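-- pv_equiv track=rewrite | github.com/Arsen1302/Code-copy-detector | TestData/solutions/problem_608_4.py | solution_608_4
-- ===== SOURCE A (Python) =====
-- def solution_608_4(s: str) -> int:
--     minFlips = flips = s.count('0')
--
--     for c in s:
--         if c == '0':
--             flips -= 1
--         else:
--             flips += 1
--         minFlips = min(minFlips, flips)
--
--     return minFlips
-- ===== SOURCE B (Python) =====
-- def solution_608_4(s: str) -> int:
--     ones = res = 0
--     for c in s:
--         if c == '0':
--             res = min(res + 1, ones)
--         else:
--             ones += 1
--     return res
-- ===== Notes on version B (the rewrite author's own statement) =====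
-- stated objective: faster
-- what changed: Replaced the zero-count-seeded prefix-balance walk with the classic incremental one-pass DP that tracks only the ones seen so far and the best cost, eliminating the separate counting pre-pass over the string.
import Mathlib
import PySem

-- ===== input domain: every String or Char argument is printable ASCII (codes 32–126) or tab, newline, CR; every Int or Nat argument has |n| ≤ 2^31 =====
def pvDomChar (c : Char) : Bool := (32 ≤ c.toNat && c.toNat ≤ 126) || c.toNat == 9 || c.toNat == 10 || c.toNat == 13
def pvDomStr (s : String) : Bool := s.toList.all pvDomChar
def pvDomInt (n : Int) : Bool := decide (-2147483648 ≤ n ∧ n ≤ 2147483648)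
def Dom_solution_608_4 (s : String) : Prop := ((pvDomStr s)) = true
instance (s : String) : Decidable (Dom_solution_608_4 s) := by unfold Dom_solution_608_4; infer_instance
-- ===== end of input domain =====

-- B replaces A's count('0')-seeded prefix-balance walk by the incremental one-pass DP
-- (ones seen so far, best cost so far) — simpler state, no counting pre-pass.


-- ===== PORT A =====
-- loop body of A: flips -= 1 on '0' else flips += 1, then minFlips = min(minFlips, flips)
def stepA (st : Int × Int) (c : Char) : Int × Int :=
  let flips := if c = '0' then st.2 - 1 else st.2 + 1
  (min st.1 flips, flips)

def solution_608_4 (s : String) : Int :=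
  let z : Int := (PySem.Str.count s "0" : Int)
  (s.toList.foldl stepA (z, z)).1

-- ===== PORT B =====
-- loop body of B: res = min(res + 1, ones) on '0', else ones += 1; state = (ones, res)
def stepB (st : Int × Int) (c : Char) : Int × Int :=
  if c = '0' then (st.1, min (st.2 + 1) st.1) else (st.1 + 1, st.2)

def solution_608_4_alt (s : String) : Int :=
  (s.toList.foldl stepB ((0 : Int), (0 : Int))).2

-- ===== PRECONDITION & SPEC =====
def Spec_solution_608_4 (s : String) (out : Int) : Prop := out = solution_608_4_alt s
instance (s : String) (out : Int) : Decidable (Spec_solution_608_4 s out) := by unfold Spec_solution_608_4; infer_instance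

-- ===== CLAIM (what is proved, stated in full; the proofs are below) =====
def Claim_equal_solution_608_4 : Prop := ∀ (s : String), Dom_solution_608_4 s → Spec_solution_608_4 s (solution_608_4 s)

-- ===== LEMMAS AND PROOFS =====

-- PySem's substring count with a single-character needle is List.count
theorem count_go_singleton (c : Char) (l : List Char) (acc : Nat) :
    PySem.Chars.count.go [c] l.length l acc = acc + l.count c := by
  induction l generalizing acc with
  | nil => simp [PySem.Chars.count.go]
  | cons h t ih =>
    simp only [List.length_cons, PySem.Chars.count.go, List.isPrefixOf]
    by_cases hc : h = c
    · subst hc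
      simp [ih]
      omega
    · have h1 : (c == h) = false := by simpa using Ne.symm hc
      have h2 : (h == c) = false := by simpa using hc
      simp [h1, h2, ih, List.count_cons]

theorem chars_count_singleton (c : Char) (l : List Char) :
    PySem.Chars.count l [c] = l.count c := by
  simp [PySem.Chars.count, List.isEmpty, count_go_singleton]

-- invariant: A's walk started at (res + z, ones + z), where z counts the '0's still to
-- come, returns the same minimum as B's DP started at (ones, res), provided res ≤ ones
theorem walk_eq_dp (l : List Char) (ones res : Int) (h : res ≤ ones) :
    (l.foldl stepA (res + (l.count '0' : Int), ones + (l.count '0' : Int))).1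
      = (l.foldl stepB (ones, res)).2 := by
  induction l generalizing ones res with
  | nil => simp
  | cons c t ih =>
    rw [List.foldl_cons, List.foldl_cons]
    by_cases hc : c = '0'
    · subst hc
      have hA : stepA (res + (List.count '0' ('0'::t) : Int), ones + (List.count '0' ('0'::t) : Int))
          '0' = (min (res + 1) ones + (List.count '0' t : Int), ones + (List.count '0' t : Int)) := by
        simp only [stepA, List.count_cons, beq_self_eq_true, Prod.mk.injEq, if_true]
        push_cast
        omega
      have hB : stepB (ones, res) '0' = (ones, min (res + 1) ones) := by
        simp [stepB]
      rw [hA, hB]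
      exact ih ones (min (res + 1) ones) (min_le_right _ _)
    · have hb : (c == '0') = false := by simpa using hc
      have hA : stepA (res + (List.count '0' (c::t) : Int), ones + (List.count '0' (c::t) : Int))
          c = (res + (List.count '0' t : Int), (ones + 1) + (List.count '0' t : Int)) := by
        simp only [stepA, if_neg hc, List.count_cons, hb, Prod.mk.injEq]
        push_cast
        omega
      have hB : stepB (ones, res) c = (ones + 1, res) := by
        simp [stepB, hc]
      rw [hA, hB]
      exact ih (ones + 1) res (by omega)

-- ===== VERDICT (by name: the statement is the Claim_ definition above) =====
theorem solution_608_4_spec : Claim_equal_solution_608_4 := by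
  intro s _
  unfold Spec_solution_608_4 solution_608_4 solution_608_4_alt
  have hz : (PySem.Str.count s "0" : Int) = (s.toList.count '0' : Int) := by
    simp only [PySem.Str.count_eq]
    rw [show ("0" : String).toList = ['0'] from rfl, chars_count_singleton]
  simp only [hz]
  have := walk_eq_dp s.toList 0 0 le_rfl
  simpa using this
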